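-- pv_equiv track=rewrite | github.com/subhayan-bhattacharya/MyALgorithms | Searching/Less_than_equalto.py | find_less_than_equalto
-- ===== SOURCE A (Python) =====
-- def find_less_than_equalto(arr,start,end,key):
--     if start <= end:
--         mid = int(start + (end - start)/2)
--         if arr[mid] == key:
--             return find_less_than_equalto(arr,mid+1,end,key)
--         elif arr[mid] < key:
--             return find_less_than_equalto(arr,mid+1,end,key)
--         else:
--             return find_less_than_equalto(arr,start,end - 1,key)
--     else:
--         return end
-- ===== SOURCE B (Python) =====
-- def find_less_than_equalto(arr, start, end, key):
--     # Iterative binary search for the last index with value <= key.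
--     while start <= end:
--         mid = (start + end) // 2
--         if arr[mid] <= key:
--             start = mid + 1
--         else:
--             end = mid - 1
--     return end
-- ===== Notes on version B (the rewrite author's own statement) =====
-- stated objective: alternative
-- what changed: Replaces A's recursion, which on a failed probe retreats end by only one step, with the textbook iterative binary search that halves the range on both sides (end = mid - 1); Pre_ restricts to sorted arrays with in-range bounds, the natural domain of a binary search, because on unsorted input or negative/overrunning bounds each program's value is an accident of its probe order and Python's index wraparound.
-- outside the precondition, e.g. on find_less_than_equalto([1, 0, 1, 2, 1], 0, 4, 0): A returns 1, B returns -1; on find_less_than_equalto([0], -3, 0, 0): A returns 0, B raises IndexError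
import Mathlib
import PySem

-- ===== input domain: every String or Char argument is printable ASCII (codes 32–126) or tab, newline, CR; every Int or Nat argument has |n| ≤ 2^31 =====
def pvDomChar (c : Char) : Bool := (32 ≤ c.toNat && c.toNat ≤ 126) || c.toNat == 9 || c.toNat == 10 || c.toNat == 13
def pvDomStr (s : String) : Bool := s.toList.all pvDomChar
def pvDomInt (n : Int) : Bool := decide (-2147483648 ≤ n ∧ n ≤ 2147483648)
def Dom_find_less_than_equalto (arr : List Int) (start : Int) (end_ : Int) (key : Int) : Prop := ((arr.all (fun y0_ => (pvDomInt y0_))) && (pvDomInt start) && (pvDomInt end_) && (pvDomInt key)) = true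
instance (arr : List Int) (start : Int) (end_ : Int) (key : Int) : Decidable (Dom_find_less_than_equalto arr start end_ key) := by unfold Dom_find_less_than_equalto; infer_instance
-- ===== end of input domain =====

-- B replaces A's recursion (which retreats `end` one step at a time on a failed
-- probe) with the textbook iterative binary search (end = mid - 1); objective: alternative.

-- ===== PORT A =====
-- termination helper for the A port (cited by decreasing_by)
theorem pv_tdiv_bounds (s e : Int) (h : s ≤ e) : s ≤ (s + e).tdiv 2 ∧ (s + e).tdiv 2 ≤ e := by
  rcases (by omega : 0 ≤ s + e ∨ s + e < 0) with h0 | h0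
  · rw [Int.tdiv_eq_ediv_of_nonneg h0]; omega
  · have h1 : (s + e).tdiv 2 = -((-(s + e)).tdiv 2) := by rw [← Int.neg_tdiv, neg_neg]
    rw [h1, Int.tdiv_eq_ediv_of_nonneg (by omega)]; omega

def find_less_than_equalto (arr : List Int) (start : Int) (end_ : Int) (key : Int) : Int :=
  if _h : start ≤ end_ then
    -- mid = int(start + (end-start)/2): on Dom the float arithmetic is exact and
    -- int() truncates toward zero, so mid = (start+end_).tdiv 2 exactly
    let mid := (start + end_).tdiv 2
    match PySem.List.pyGet? arr mid with
    | none => 0  -- Python raises IndexError here; such inputs are outside Pre_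
    | some v =>
      if v == key then find_less_than_equalto arr (mid + 1) end_ key
      else if v < key then find_less_than_equalto arr (mid + 1) end_ key
      else find_less_than_equalto arr start (end_ - 1) key
  else end_
termination_by (end_ - start + 1).toNat
decreasing_by
  all_goals
    have := pv_tdiv_bounds start end_ _h
    omega

-- ===== PORT B =====
-- termination helper for the B port (cited by decreasing_by)
theorem pv_fdiv_eq (a : Int) : a.fdiv 2 = a / 2 := by
  rw [Int.fdiv_eq_ediv]; simp

theorem pv_fdiv_bounds (s e : Int) (h : s ≤ e) : s ≤ (s + e).fdiv 2 ∧ (s + e).fdiv 2 ≤ e := by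
  rw [pv_fdiv_eq]; omega

-- the while loop of Source B, state (start, end)
def pvBinLoop (arr : List Int) (key : Int) (s : Int) (e : Int) : Int :=
  if _h : s ≤ e then
    let mid := (s + e).fdiv 2          -- (start + end) // 2
    match PySem.List.pyGet? arr mid with
    | none => 0  -- Python raises IndexError here; such inputs are outside Pre_
    | some v =>
      if v ≤ key then pvBinLoop arr key (mid + 1) e
      else pvBinLoop arr key s (mid - 1)
  else e
termination_by (e - s + 1).toNat
decreasing_by
  all_goals
    have := pv_fdiv_bounds s e _h
    omega

def find_less_than_equalto_alt (arr : List Int) (start : Int) (end_ : Int) (key : Int) : Int :=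
  pvBinLoop arr key start end_

-- ===== PRECONDITION & SPEC =====
-- Pre_ restricts nonempty ranges to sorted arrays with in-range bounds — the
-- natural domain of a binary search: on unsorted input each program's value is an
-- accident of its probe order, and negative or overrunning bounds lead to Python's
-- negative-index wraparound or an IndexError.
def Pre_find_less_than_equalto (arr : List Int) (start : Int) (end_ : Int) (key : Int) : Prop :=
  end_ < start ∨ (0 ≤ start ∧ end_ < (arr.length : Int) ∧ arr.Pairwise (· ≤ ·))
instance (arr : List Int) (start : Int) (end_ : Int) (key : Int) : Decidable (Pre_find_less_than_equalto arr start end_ key) := by unfold Pre_find_less_than_equalto; infer_instance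

def pvWitness_find_less_than_equalto : List Int × Int × Int × Int := ([1, 3, 3, 7], 0, 3, 4)

def Spec_find_less_than_equalto (arr : List Int) (start : Int) (end_ : Int) (key : Int) (out : Int) : Prop := out = find_less_than_equalto_alt arr start end_ key
instance (arr : List Int) (start : Int) (end_ : Int) (key : Int) (out : Int) : Decidable (Spec_find_less_than_equalto arr start end_ key out) := by unfold Spec_find_less_than_equalto; infer_instance

-- ===== CLAIM (what is proved, stated in full; the proofs are below) =====
def Claim_equal_find_less_than_equalto : Prop := ∀ (arr : List Int) (start : Int) (end_ : Int) (key : Int), Dom_find_less_than_equalto arr start end_ key → Pre_find_less_than_equalto arr start end_ key → Spec_find_less_than_equalto arr start end_ key (find_less_than_equalto arr start end_ key)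

-- ===== LEMMAS AND PROOFS =====

-- reference function both ports are reduced to: scan down from e for the last
-- index with value ≤ key, returning s - 1 (the final e) if none
def pvLastLE (arr : List Int) (key : Int) (s : Int) (e : Int) : Int :=
  if _h : s ≤ e then
    match PySem.List.pyGet? arr e with
    | none => 0
    | some v => if v ≤ key then e else pvLastLE arr key s (e - 1)
  else e
termination_by (e - s + 1).toNat

-- sorted access monotonicity
theorem pv_sorted_mono (arr : List Int) (h : arr.Pairwise (· ≤ ·))
    {i j : Nat} (hij : i ≤ j) (hj : j < arr.length) : arr[i] ≤ arr[j] := by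
  rcases Nat.lt_or_eq_of_le hij with hlt | heq
  · exact (List.pairwise_iff_getElem.mp h) i j (by omega) hj hlt
  · subst heq; exact le_refl _

-- lowering the floor past a known hit does not change pvLastLE
theorem pv_lastLE_floor (arr : List Int) (key : Int) (s m : Int)
    (hm0 : 0 ≤ m) (hsm : s ≤ m) (hv : ∀ v, PySem.List.pyGet? arr m = some v → v ≤ key) :
    ∀ (n : Nat) (e : Int), (e - m).toNat ≤ n → m ≤ e → e < (arr.length : Int) →
    pvLastLE arr key s e = pvLastLE arr key (m + 1) e := by
  intro n
  induction n with
  | zero =>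
    intro e hn hme hlen
    have he : e = m := by omega
    have hg := PySem.List.pyGet?_eq_some_getElem arr (i := e) (by omega) (by omega)
    rw [pvLastLE]
    conv_rhs => rw [pvLastLE]
    simp [show s ≤ e by omega, show ¬ m + 1 ≤ e by omega, hg,
      hv _ (by rw [← he]; exact hg)]
  | succ n ih =>
    intro e hn hme hlen
    have hg := PySem.List.pyGet?_eq_some_getElem arr (i := e) (by omega) (by omega)
    rcases (by omega : e = m ∨ m + 1 ≤ e) with he | he
    · rw [pvLastLE]
      conv_rhs => rw [pvLastLE]
      simp [show s ≤ e by omega, show ¬ m + 1 ≤ e by omega, hg,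
        hv _ (by rw [← he]; exact hg)]
    · rw [pvLastLE]
      conv_rhs => rw [pvLastLE]
      simp only [show s ≤ e by omega, dite_true, he, dite_true, hg]
      by_cases hvk : arr[e.toNat] ≤ key
      · simp [hvk]
      · simp only [hvk, if_false]
        exact ih (e - 1) (by omega) (by omega) (by omega)

-- dropping a top segment that is entirely > key does not change pvLastLE
theorem pv_lastLE_drop (arr : List Int) (key : Int) (s m : Int)
    (hm0 : 0 ≤ m) (hsm : s ≤ m)
    (hgt : ∀ (j : Nat) (hj : j < arr.length), m ≤ (j : Int) → key < arr[j]) :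
    ∀ (n : Nat) (e : Int), (e - m + 1).toNat ≤ n → e < (arr.length : Int) →
    pvLastLE arr key s e = pvLastLE arr key s (min e (m - 1)) := by
  intro n
  induction n with
  | zero =>
    intro e hn hlen
    rw [show min e (m - 1) = e by omega]
  | succ n ih =>
    intro e hn hlen
    rcases (by omega : e ≤ m - 1 ∨ m ≤ e) with he | he
    · rw [show min e (m - 1) = e by omega]
    · have hg := PySem.List.pyGet?_eq_some_getElem arr (i := e) (by omega) (by omega)
      have hke : key < arr[e.toNat] := hgt e.toNat (by omega) (by omega)
      rw [pvLastLE]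
      simp only [show s ≤ e by omega, dite_true, hg, show ¬ arr[e.toNat] ≤ key by omega,
        if_false]
      rw [ih (e - 1) (by omega) (by omega)]
      congr 1
      omega

-- A equals pvLastLE on sorted, in-range states
theorem pv_A_lastLE (arr : List Int) (key : Int) (hst : arr.Pairwise (· ≤ ·)) :
    ∀ (n : Nat) (s e : Int), (e - s + 1).toNat ≤ n → 0 ≤ s → e < (arr.length : Int) →
    find_less_than_equalto arr s e key = pvLastLE arr key s e := by
  intro n
  induction n with
  | zero =>
    intro s e hn hs hlen
    rw [find_less_than_equalto.eq_def, pvLastLE]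
    simp [show ¬ s ≤ e by omega]
  | succ n ih =>
    intro s e hn hs hlen
    by_cases hse : s ≤ e
    · have htd : (s + e).tdiv 2 = (s + e) / 2 := Int.tdiv_eq_ediv_of_nonneg (by omega)
      have hmb : s ≤ (s + e) / 2 ∧ (s + e) / 2 ≤ e := by omega
      have hg := PySem.List.pyGet?_eq_some_getElem arr (i := (s + e) / 2) (by omega) (by omega)
      set v : Int := arr[((s + e) / 2).toNat] with hvv
      by_cases hvk : v ≤ key
      · -- probe succeeds: A jumps to (mid+1, e); pvLastLE's floor can be lowered
        rw [find_less_than_equalto.eq_def]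
        simp only [hse, dite_true, htd, hg]
        have hstep : find_less_than_equalto arr ((s + e) / 2 + 1) e key = pvLastLE arr key ((s + e) / 2 + 1) e :=
          ih ((s + e) / 2 + 1) e (by omega) (by omega) hlen
        have hfl := pv_lastLE_floor arr key s ((s + e) / 2) (by omega) hmb.1
          (by intro w hw; rw [hg] at hw; injection hw with hw; omega)
          (e - (s + e) / 2).toNat e (by omega) hmb.2 hlen
        by_cases heq : v == key
        · simp only [heq, if_true]; rw [hstep, ← hfl]
        · have hlt : v < key := by simp at heq; omega
          simp only [heq, Bool.false_eq_true, if_false, hlt, if_true]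
          rw [hstep, ← hfl]
      · -- probe fails: A retreats e by one; arr[e] > key so pvLastLE recurses too
        rw [find_less_than_equalto.eq_def]
        have hne : ¬ v == key := by simp; omega
        simp only [hse, dite_true, htd, hg, hne, Bool.false_eq_true, if_false,
          show ¬ v < key by omega, if_false]
        have hge := PySem.List.pyGet?_eq_some_getElem arr (i := e) (by omega) (by omega)
        have hmono : v ≤ arr[e.toNat] := pv_sorted_mono arr hst
          (by omega : ((s + e) / 2).toNat ≤ e.toNat) (by omega)
        rw [ih s (e - 1) (by omega) hs (by omega)]
        conv_rhs => rw [pvLastLE]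
        simp [hse, hge, show ¬ arr[e.toNat] ≤ key by omega]
    · rw [find_less_than_equalto.eq_def, pvLastLE]
      simp [hse]

-- B equals pvLastLE on sorted, in-range states
theorem pv_B_lastLE (arr : List Int) (key : Int) (hst : arr.Pairwise (· ≤ ·)) :
    ∀ (n : Nat) (s e : Int), (e - s + 1).toNat ≤ n → 0 ≤ s → e < (arr.length : Int) →
    pvBinLoop arr key s e = pvLastLE arr key s e := by
  intro n
  induction n with
  | zero =>
    intro s e hn hs hlen
    rw [pvBinLoop, pvLastLE]
    simp [show ¬ s ≤ e by omega]
  | succ n ih =>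
    intro s e hn hs hlen
    by_cases hse : s ≤ e
    · have hfd : (s + e).fdiv 2 = (s + e) / 2 := pv_fdiv_eq (s + e)
      have hmb : s ≤ (s + e) / 2 ∧ (s + e) / 2 ≤ e := by omega
      have hg := PySem.List.pyGet?_eq_some_getElem arr (i := (s + e) / 2) (by omega) (by omega)
      set v : Int := arr[((s + e) / 2).toNat] with hvv
      rw [pvBinLoop]
      simp only [hse, dite_true, hfd, hg]
      by_cases hvk : v ≤ key
      · simp only [hvk, if_true]
        rw [ih ((s + e) / 2 + 1) e (by omega) (by omega) hlen]
        exact (pv_lastLE_floor arr key s ((s + e) / 2) (by omega) hmb.1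
          (by intro w hw; rw [hg] at hw; injection hw with hw; omega)
          (e - (s + e) / 2).toNat e (by omega) hmb.2 hlen).symm
      · simp only [hvk, if_false]
        rw [ih s ((s + e) / 2 - 1) (by omega) hs (by omega)]
        have hdrop := pv_lastLE_drop arr key s ((s + e) / 2) (by omega) hmb.1
          (by
            intro j hj hjm
            have := pv_sorted_mono arr hst
              (by omega : ((s + e) / 2).toNat ≤ j) hj
            omega)
          (e - (s + e) / 2 + 1).toNat e (by omega) hlen
        rw [hdrop, show min e ((s + e) / 2 - 1) = (s + e) / 2 - 1 by omega]
    · rw [pvBinLoop, pvLastLE]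
      simp [hse]

-- ===== VERDICT (by name: the statement is the Claim_ definition above) =====
theorem find_less_than_equalto_spec : Claim_equal_find_less_than_equalto := by
  intro arr start end_ key _hdom hpre
  unfold Spec_find_less_than_equalto find_less_than_equalto_alt
  rcases hpre with h | ⟨h0, hlen, hst⟩
  · rw [find_less_than_equalto.eq_def, pvBinLoop]
    simp [show ¬ start ≤ end_ by omega]
  · rw [pv_A_lastLE arr key hst (end_ - start + 1).toNat start end_ (by omega) h0 hlen,
      pv_B_lastLE arr key hst (end_ - start + 1).toNat start end_ (by omega) h0 hlen]
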